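-- pv_equiv track=rewrite | github.com/comeony/RingMo | ringmo_framework/models/layers/patch.py | get_kernel_size
-- ===== SOURCE A (Python) =====
-- def get_kernel_size(patch_size):
--     """
--         input: 2^i & i <= 5 | 14
--         output: a list of kernel size
--     """
--     x = None
--     y = None
--     z = None
--     ans = False
--     for i in range(1, patch_size + 1):
--         if patch_size % i == 0:
--             x = i
--             mul_y_z = patch_size // i
--             for j in range(1, mul_y_z + 1):
--                 if mul_y_z % j == 0:
--                     y = j
--                     z = mul_y_z // j
--                     if x >= y >= z:
--                         ans = True
--                         break
--             if ans:
--                 break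
--     if not ans:
--         raise ValueError(patch_size)
--     return [x, y, z]
-- ===== SOURCE B (Python) =====
-- def get_kernel_size(patch_size):
--     # Enumerate divisors of patch_size only up to sqrt(patch_size), then search
--     # the sorted divisor list for the smallest x (then smallest y) with
--     # x >= y >= patch_size // (x*y); O(sqrt(n)) instead of A's O(n) scans.
--     if patch_size < 1:
--         raise ValueError(patch_size)
--     small = []
--     large = []
--     d = 1
--     while d * d <= patch_size:
--         if patch_size % d == 0:
--             small.append(d)
--             if d != patch_size // d:
--                 large.append(patch_size // d)
--         d += 1
--     divs = small + large[::-1]  # all divisors, ascending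
--     for x in divs:
--         m = patch_size // x
--         for y in divs:
--             if y <= x and m % y == 0 and y * y >= m:
--                 return [x, y, m // y]
--     raise ValueError(patch_size)  # unreachable for patch_size >= 1
-- ===== Notes on version B (the rewrite author's own statement) =====
-- stated objective: faster
-- what changed: B enumerates the divisors of patch_size only up to sqrt(patch_size) (collecting cofactors) and searches the sorted divisor list for the first valid (x, y) pair, instead of A's scans over the full ranges 1..patch_size and 1..patch_size//i.
import Mathlib
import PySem

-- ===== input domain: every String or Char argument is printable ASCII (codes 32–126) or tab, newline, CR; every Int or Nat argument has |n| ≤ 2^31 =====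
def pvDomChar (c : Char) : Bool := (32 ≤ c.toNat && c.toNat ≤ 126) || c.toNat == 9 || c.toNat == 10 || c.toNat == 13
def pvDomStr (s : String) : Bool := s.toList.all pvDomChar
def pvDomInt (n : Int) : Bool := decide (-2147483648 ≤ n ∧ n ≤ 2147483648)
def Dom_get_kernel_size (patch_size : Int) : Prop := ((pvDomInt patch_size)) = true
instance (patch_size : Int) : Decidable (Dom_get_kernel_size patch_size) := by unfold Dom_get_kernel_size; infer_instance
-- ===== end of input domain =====

-- B replaces A's full 1..n scans by enumerating divisors only up to √n (objective: faster, asymptotic).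

-- ===== PORT A =====
-- inner 'for j in range(1, mul_y_z+1)' with break: returns some (y, z) at the break, none if the loop ends
def pvInnerA (x mul : Int) : List Int → Option (Int × Int)
  | [] => none
  | j :: js =>
    if PySem.Int.mod mul j = 0 then
      if x ≥ j ∧ j ≥ PySem.Int.floordiv mul j then some (j, PySem.Int.floordiv mul j)
      else pvInnerA x mul js
    else pvInnerA x mul js

-- outer 'for i in range(1, patch_size+1)' with break: returns some (x, y, z) at the break
def pvOuterA (ps : Int) : List Int → Option (Int × Int × Int)
  | [] => none
  | i :: is =>
    if PySem.Int.mod ps i = 0 then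
      match pvInnerA i (PySem.Int.floordiv ps i)
          (PySem.List.pyRange 1 (PySem.Int.floordiv ps i + 1)) with
      | some (y, z) => some (i, y, z)
      | none => pvOuterA ps is
    else pvOuterA ps is

def get_kernel_size (patch_size : Int) : List Int :=
  match pvOuterA patch_size (PySem.List.pyRange 1 (patch_size + 1)) with
  | some (x, y, z) => [x, y, z]
  | none => []  -- Python raises ValueError here; excluded by Pre_

-- ===== PORT B =====
-- termination measure fact for the 'while d*d <= patch_size' loop (cited by pvBuildDivs)
theorem pvBuildMeas {ps d : Int} (h : d * d ≤ ps) : (ps + 1 - (d + 1)).toNat < (ps + 1 - d).toNat := by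
  have hd : d ≤ ps := by
    rcases le_or_gt d 1 with h1 | h1
    · nlinarith [mul_self_nonneg d]
    · nlinarith
  omega

-- the while loop collecting divisors ≤ √ps into small and their cofactors into large
def pvBuildDivs (ps d : Int) (small large : List Int) : List Int × List Int :=
  if h : d * d ≤ ps then
    if PySem.Int.mod ps d = 0 then
      if d ≠ PySem.Int.floordiv ps d then
        pvBuildDivs ps (d + 1) (small ++ [d]) (large ++ [PySem.Int.floordiv ps d])
      else pvBuildDivs ps (d + 1) (small ++ [d]) large
    else pvBuildDivs ps (d + 1) small large
  else (small, large)
termination_by (ps + 1 - d).toNat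
decreasing_by all_goals exact pvBuildMeas h

-- inner 'for y in divs' with return
def pvInnerB (m x : Int) : List Int → Option Int
  | [] => none
  | y :: ys =>
    if y ≤ x ∧ PySem.Int.mod m y = 0 ∧ y * y ≥ m then some y
    else pvInnerB m x ys

-- outer 'for x in divs' with return
def pvOuterB (ps : Int) (divs : List Int) : List Int → Option (List Int)
  | [] => none
  | x :: xs =>
    match pvInnerB (PySem.Int.floordiv ps x) x divs with
    | some y => some [x, y, PySem.Int.floordiv (PySem.Int.floordiv ps x) y]
    | none => pvOuterB ps divs xs

def get_kernel_size_alt (patch_size : Int) : List Int :=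
  if patch_size < 1 then []  -- Python raises ValueError here; excluded by Pre_
  else
    let sl := pvBuildDivs patch_size 1 [] []
    let divs := sl.1 ++ sl.2.reverse
    match pvOuterB patch_size divs divs with
    | some r => r
    | none => []  -- Python raises ValueError here (unreachable for patch_size ≥ 1)

-- ===== PRECONDITION & SPEC =====
-- Pre_ excludes exactly the nonpositive patch sizes, on which Python A raises ValueError (empty range, ans stays False).
def Pre_get_kernel_size (patch_size : Int) : Prop := 1 ≤ patch_size
instance (patch_size : Int) : Decidable (Pre_get_kernel_size patch_size) := by unfold Pre_get_kernel_size; infer_instance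
def pvWitness_get_kernel_size : Int := 14

def Spec_get_kernel_size (patch_size : Int) (out : List Int) : Prop := out = get_kernel_size_alt patch_size
instance (patch_size : Int) (out : List Int) : Decidable (Spec_get_kernel_size patch_size out) := by unfold Spec_get_kernel_size; infer_instance

-- ===== CLAIM (what is proved, stated in full; the proofs are below) =====
def Claim_equal_get_kernel_size : Prop := ∀ (patch_size : Int), Dom_get_kernel_size patch_size → Pre_get_kernel_size patch_size → Spec_get_kernel_size patch_size (get_kernel_size patch_size)

-- ===== LEMMAS AND PROOFS =====

-- the boolean predicates the two inner/outer searches are find?-searches for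
def pvPA (x m j : Int) : Bool :=
  decide (PySem.Int.mod m j = 0) && decide (x ≥ j ∧ j ≥ PySem.Int.floordiv m j)
def pvPB (x m y : Int) : Bool :=
  decide (y ≤ x ∧ PySem.Int.mod m y = 0 ∧ y * y ≥ m)

theorem pvInnerA_eq (x m : Int) (l : List Int) :
    pvInnerA x m l = (l.find? (pvPA x m)).map (fun j => (j, PySem.Int.floordiv m j)) := by
  induction l with
  | nil => rfl
  | cons j js ih =>
    by_cases h1 : PySem.Int.mod m j = 0 <;>
      by_cases h2 : x ≥ j ∧ j ≥ PySem.Int.floordiv m j <;>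
        simp [pvInnerA, pvPA, List.find?, h1, h2, ih]

theorem pvInnerB_eq (m x : Int) (l : List Int) :
    pvInnerB m x l = l.find? (pvPB x m) := by
  induction l with
  | nil => rfl
  | cons y ys ih =>
    by_cases h : y ≤ x ∧ PySem.Int.mod m y = 0 ∧ y * y ≥ m <;>
      simp [pvInnerB, pvPB, List.find?, h, ih]

theorem pvOuterA_eq (ps : Int) (l : List Int) :
    pvOuterA ps l =
      (l.find? (fun i => decide (PySem.Int.mod ps i = 0) &&
          (pvInnerA i (PySem.Int.floordiv ps i)
            (PySem.List.pyRange 1 (PySem.Int.floordiv ps i + 1))).isSome)).bind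
        (fun i => (pvInnerA i (PySem.Int.floordiv ps i)
            (PySem.List.pyRange 1 (PySem.Int.floordiv ps i + 1))).map
          (fun yz => (i, yz.1, yz.2))) := by
  induction l with
  | nil => rfl
  | cons i is ih =>
    by_cases h1 : PySem.Int.mod ps i = 0
    · rcases hFA : pvInnerA i (PySem.Int.floordiv ps i)
          (PySem.List.pyRange 1 (PySem.Int.floordiv ps i + 1)) with _ | ⟨y, z⟩ <;>
        simp [pvOuterA, List.find?, h1, hFA, ih]
    · simp [pvOuterA, List.find?, h1, ih]

theorem pvOuterB_eq (ps : Int) (divs l : List Int) :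
    pvOuterB ps divs l =
      (l.find? (fun x => (pvInnerB (PySem.Int.floordiv ps x) x divs).isSome)).bind
        (fun x => (pvInnerB (PySem.Int.floordiv ps x) x divs).map
          (fun y => [x, y, PySem.Int.floordiv (PySem.Int.floordiv ps x) y])) := by
  induction l with
  | nil => rfl
  | cons x xs ih =>
    rcases hF : pvInnerB (PySem.Int.floordiv ps x) x divs with _ | y <;>
      simp [pvOuterB, List.find?, hF, ih]

-- first match in two strictly sorted lists coincides when the predicates pick the same elements
theorem pvFind?_congr_sorted (p q : Int → Bool) (l1 l2 : List Int)
    (h1 : l1.Pairwise (· < ·)) (h2 : l2.Pairwise (· < ·))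
    (h : ∀ a, (a ∈ l1 ∧ p a = true) ↔ (a ∈ l2 ∧ q a = true)) :
    l1.find? p = l2.find? q := by
  have hf : l1.filter p = l2.filter q := by
    have n1 : (l1.filter p).Nodup := (h1.filter p).imp ne_of_lt
    have n2 : (l2.filter q).Nodup := (h2.filter q).imp ne_of_lt
    have perm : (l1.filter p).Perm (l2.filter q) := by
      refine (List.perm_ext_iff_of_nodup n1 n2).mpr ?_
      intro a
      simp only [List.mem_filter]
      exact h a
    exact perm.eq_of_pairwise (fun a b _ _ hab hba => absurd hba (lt_asymm hab))
      (h1.filter p) (h2.filter q)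
  rw [← List.head?_filter, ← List.head?_filter, hf]

-- 1 ≤ b / a for a positive divisor a of b ≥ 1
theorem pvDivGeOne {a b : Int} (ha : 0 < a) (hab : a ∣ b) (hb : 1 ≤ b) : 1 ≤ b / a := by
  rw [Int.le_ediv_iff_mul_le ha, one_mul]
  exact Int.le_of_dvd (by omega) hab

-- the divisor-list invariant of pvBuildDivs
theorem pvBuildDivs_spec (ps d : Int) (small large : List Int) :
    1 ≤ ps → 1 ≤ d →
    (∀ a, a ∈ small ↔ (1 ≤ a ∧ a < d ∧ a * a ≤ ps ∧ ps % a = 0)) →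
    (∀ a, a ∈ large ↔ (1 ≤ a ∧ ps < a * a ∧ ps % a = 0 ∧ ps / a < d)) →
    small.Pairwise (· < ·) → large.Pairwise (fun a b => b < a) →
    ((∀ a, a ∈ (pvBuildDivs ps d small large).1 ++ (pvBuildDivs ps d small large).2.reverse ↔
        (1 ≤ a ∧ a ≤ ps ∧ ps % a = 0))
      ∧ ((pvBuildDivs ps d small large).1 ++ (pvBuildDivs ps d small large).2.reverse).Pairwise (· < ·)) := by
  fun_induction pvBuildDivs ps d small large with
  | case1 d small large h hmod hne ih =>
    intro hps hd1 hs hl hss hls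
    have hd0 : (0:Int) < d := by omega
    rw [PySem.Int.mod_eq_emod_of_pos hd0] at hmod
    rw [PySem.Int.floordiv_eq_ediv_of_pos hd0] at hne ih ⊢
    have hdvd : d ∣ ps := Int.dvd_of_emod_eq_zero hmod
    have hqd : ps / d * d = ps := Int.ediv_mul_cancel hdvd
    have hq1 : 1 ≤ ps / d := pvDivGeOne hd0 hdvd hps
    have hdq : d < ps / d := by
      have hle : d ≤ ps / d := by nlinarith
      omega
    refine ih hps (by omega) ?_ ?_ ?_ ?_
    · intro a
      rw [List.mem_append, List.mem_singleton, hs a]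
      constructor
      · rintro (⟨h1, h2, h3, h4⟩ | rfl)
        · exact ⟨h1, by omega, h3, h4⟩
        · exact ⟨by omega, by omega, h, hmod⟩
      · rintro ⟨h1, h2, h3, h4⟩
        by_cases hc : a = d
        · exact Or.inr hc
        · exact Or.inl ⟨h1, by omega, h3, h4⟩
    · intro a
      rw [List.mem_append, List.mem_singleton, hl a]
      constructor
      · rintro (⟨h1, h2, h3, h4⟩ | rfl)
        · exact ⟨h1, h2, h3, by omega⟩
        · refine ⟨by omega, by nlinarith, ?_, ?_⟩
          · exact Int.emod_eq_zero_of_dvd ⟨d, by linarith⟩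
          · have : ps / (ps / d) = d :=
              Int.ediv_eq_of_eq_mul_left (by omega) (by linarith [hqd])
            omega
      · rintro ⟨h1, h2, h3, h4⟩
        by_cases hc : ps / a < d
        · exact Or.inl ⟨h1, h2, h3, hc⟩
        · have hea : ps / a = d := by omega
          have hadvd : a ∣ ps := Int.dvd_of_emod_eq_zero h3
          have haq : ps / a * a = ps := Int.ediv_mul_cancel hadvd
          right
          have hda : d * a = ps := by rw [← hea]; linarith [haq]
          have : ps / d = a := Int.ediv_eq_of_eq_mul_left (by omega) (by linarith [hda])
          omega
    · refine List.pairwise_append.mpr ⟨hss, List.pairwise_singleton _ _, ?_⟩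
      intro a ha b hb
      rw [List.mem_singleton] at hb
      subst hb
      exact ((hs a).mp ha).2.1
    · refine List.pairwise_append.mpr ⟨hls, List.pairwise_singleton _ _, ?_⟩
      intro a ha b hb
      rw [List.mem_singleton] at hb
      subst hb
      obtain ⟨h1, h2, h3, h4⟩ := (hl a).mp ha
      have hadvd : a ∣ ps := Int.dvd_of_emod_eq_zero h3
      have haq : ps / a * a = ps := Int.ediv_mul_cancel hadvd
      have he1 : 1 ≤ ps / a := pvDivGeOne (by omega) hadvd hps
      by_contra hcon
      push Not at hcon
      nlinarith
  | case2 d small large h hmod hne ih =>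
    intro hps hd1 hs hl hss hls
    have hd0 : (0:Int) < d := by omega
    rw [PySem.Int.mod_eq_emod_of_pos hd0] at hmod
    rw [PySem.Int.floordiv_eq_ediv_of_pos hd0] at hne
    push Not at hne
    have hdvd : d ∣ ps := Int.dvd_of_emod_eq_zero hmod
    have hqd : ps / d * d = ps := Int.ediv_mul_cancel hdvd
    have hpsdd : ps = d * d := by nlinarith
    refine ih hps (by omega) ?_ ?_ ?_ hls
    · intro a
      rw [List.mem_append, List.mem_singleton, hs a]
      constructor
      · rintro (⟨h1, h2, h3, h4⟩ | rfl)
        · exact ⟨h1, by omega, h3, h4⟩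
        · exact ⟨by omega, by omega, h, hmod⟩
      · rintro ⟨h1, h2, h3, h4⟩
        by_cases hc : a = d
        · exact Or.inr hc
        · exact Or.inl ⟨h1, by omega, h3, h4⟩
    · intro a
      rw [hl a]
      constructor
      · rintro ⟨h1, h2, h3, h4⟩
        exact ⟨h1, h2, h3, by omega⟩
      · rintro ⟨h1, h2, h3, h4⟩
        refine ⟨h1, h2, h3, ?_⟩
        by_cases hc : ps / a < d
        · exact hc
        · have hea : ps / a = d := by omega
          have hadvd : a ∣ ps := Int.dvd_of_emod_eq_zero h3
          have haq : ps / a * a = ps := Int.ediv_mul_cancel hadvd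
          have hda : d * a = ps := by rw [← hea]; linarith [haq]
          have had : a = d := mul_left_cancel₀ (by omega : d ≠ 0) (by rw [hda, hpsdd])
          exfalso
          rw [had] at h2
          omega
    · refine List.pairwise_append.mpr ⟨hss, List.pairwise_singleton _ _, ?_⟩
      intro a ha b hb
      rw [List.mem_singleton] at hb
      subst hb
      exact ((hs a).mp ha).2.1
  | case3 d small large h hmod ih =>
    intro hps hd1 hs hl hss hls
    have hd0 : (0:Int) < d := by omega
    rw [PySem.Int.mod_eq_emod_of_pos hd0] at hmod
    refine ih hps (by omega) ?_ ?_ hss hls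
    · intro a
      rw [hs a]
      constructor
      · rintro ⟨h1, h2, h3, h4⟩
        exact ⟨h1, by omega, h3, h4⟩
      · rintro ⟨h1, h2, h3, h4⟩
        refine ⟨h1, ?_, h3, h4⟩
        by_cases hc : a = d
        · subst hc; exact absurd h4 hmod
        · omega
    · intro a
      rw [hl a]
      constructor
      · rintro ⟨h1, h2, h3, h4⟩
        exact ⟨h1, h2, h3, by omega⟩
      · rintro ⟨h1, h2, h3, h4⟩
        refine ⟨h1, h2, h3, ?_⟩
        by_cases hc : ps / a < d
        · exact hc
        · have hea : ps / a = d := by omega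
          have hadvd : a ∣ ps := Int.dvd_of_emod_eq_zero h3
          have haq : ps / a * a = ps := Int.ediv_mul_cancel hadvd
          have hda : d * a = ps := by rw [← hea]; linarith [haq]
          exact absurd (Int.emod_eq_zero_of_dvd ⟨a, hda.symm⟩) hmod
  | case4 d small large h =>
    intro hps hd1 hs hl hss hls
    push Not at h
    constructor
    · intro a
      rw [List.mem_append, List.mem_reverse]
      constructor
      · rintro (ha | ha)
        · obtain ⟨h1, h2, h3, h4⟩ := (hs a).mp ha
          exact ⟨h1, Int.le_of_dvd (by omega) (Int.dvd_of_emod_eq_zero h4), h4⟩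
        · obtain ⟨h1, h2, h3, h4⟩ := (hl a).mp ha
          exact ⟨h1, Int.le_of_dvd (by omega) (Int.dvd_of_emod_eq_zero h3), h3⟩
      · rintro ⟨h1, h2, h3⟩
        by_cases hc : a * a ≤ ps
        · refine Or.inl ((hs a).mpr ⟨h1, ?_, hc, h3⟩)
          nlinarith
        · push Not at hc
          refine Or.inr ((hl a).mpr ⟨h1, hc, h3, ?_⟩)
          have hadvd : a ∣ ps := Int.dvd_of_emod_eq_zero h3
          have haq : ps / a * a = ps := Int.ediv_mul_cancel hadvd
          have he1 : 1 ≤ ps / a := pvDivGeOne (by omega) hadvd hps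
          by_contra hcon
          push Not at hcon
          have hlt : ps / a < a := by nlinarith
          have h5 : d * d ≤ (ps / a) * (ps / a) := mul_le_mul hcon hcon (by omega) (by omega)
          nlinarith [mul_lt_mul_of_pos_left hlt he1]
    · refine List.pairwise_append.mpr ⟨hss, List.pairwise_reverse.mpr hls, ?_⟩
      intro a ha b hb
      rw [List.mem_reverse] at hb
      obtain ⟨ha1, ha2, ha3, ha4⟩ := (hs a).mp ha
      obtain ⟨hb1, hb2, hb3, hb4⟩ := (hl b).mp hb
      nlinarith

-- pvBuildDivs at the start state: the sorted list of all divisors of ps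
theorem pvDivs_spec (ps : Int) (hps : 1 ≤ ps) :
    (∀ a, a ∈ (pvBuildDivs ps 1 [] []).1 ++ (pvBuildDivs ps 1 [] []).2.reverse ↔
        (1 ≤ a ∧ a ≤ ps ∧ ps % a = 0))
      ∧ ((pvBuildDivs ps 1 [] []).1 ++ (pvBuildDivs ps 1 [] []).2.reverse).Pairwise (· < ·) := by
  refine pvBuildDivs_spec ps 1 [] [] hps le_rfl ?_ ?_ List.Pairwise.nil List.Pairwise.nil
  · intro a; simp; omega
  · intro a
    simp only [List.not_mem_nil, false_iff]
    rintro ⟨ha1, _, hmod, hlt⟩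
    have : 1 ≤ ps / a := pvDivGeOne (by omega) (Int.dvd_of_emod_eq_zero hmod) hps
    omega

-- the two inner searches find the same first y
theorem pvInner_eq (ps x : Int) (divs : List Int) (hps : 1 ≤ ps)
    (hdivs : ∀ a, a ∈ divs ↔ (1 ≤ a ∧ a ≤ ps ∧ ps % a = 0))
    (hsort : divs.Pairwise (· < ·))
    (hx1 : 1 ≤ x) (hxd : x ∣ ps) :
    (PySem.List.pyRange 1 (ps / x + 1)).find? (pvPA x (ps / x)) = divs.find? (pvPB x (ps / x)) := by
  have hxq : ps / x * x = ps := Int.ediv_mul_cancel hxd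
  have hmdvd : ps / x ∣ ps := ⟨x, by linarith⟩
  have hm1 : 1 ≤ ps / x := pvDivGeOne (by omega) hxd hps
  have hmps : ps / x ≤ ps := Int.le_of_dvd (by omega) hmdvd
  refine pvFind?_congr_sorted _ _ _ _ (PySem.List.pairwise_lt_pyRange_one 1 (ps / x + 1)) hsort ?_
  intro a
  simp only [PySem.List.mem_pyRange_one, pvPA, pvPB, Bool.and_eq_true, decide_eq_true_eq, hdivs a]
  constructor
  · rintro ⟨⟨ha1, ha2⟩, hmod, hxa, haz⟩
    have ha0 : (0:Int) < a := by omega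
    have hadm : a ∣ ps / x := (PySem.Int.mod_eq_zero_iff_dvd _ _).mp hmod
    have haq : ps / x / a * a = ps / x := Int.ediv_mul_cancel hadm
    rw [PySem.Int.floordiv_eq_ediv_of_pos ha0] at haz
    refine ⟨⟨ha1, by omega, Int.emod_eq_zero_of_dvd (dvd_trans hadm hmdvd)⟩, by omega, hmod, ?_⟩
    nlinarith [mul_le_mul_of_nonneg_right haz (by omega : (0:Int) ≤ a)]
  · rintro ⟨⟨ha1, ha2, hamod⟩, hax, hmod, hsq⟩
    have ha0 : (0:Int) < a := by omega
    have hadm : a ∣ ps / x := (PySem.Int.mod_eq_zero_iff_dvd _ _).mp hmod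
    have haq : ps / x / a * a = ps / x := Int.ediv_mul_cancel hadm
    have ham : a ≤ ps / x := Int.le_of_dvd (by omega) hadm
    refine ⟨⟨ha1, by omega⟩, hmod, by omega, ?_⟩
    rw [PySem.Int.floordiv_eq_ediv_of_pos ha0]
    exact le_of_mul_le_mul_right (by nlinarith) ha0

-- ===== VERDICT (by name: the statement is the Claim_ definition above) =====
theorem get_kernel_size_spec : Claim_equal_get_kernel_size := by
  intro ps _hdom hpre
  have hps : 1 ≤ ps := hpre
  unfold Spec_get_kernel_size
  obtain ⟨hdivs, hsort⟩ := pvDivs_spec ps hps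
  have hBalt : get_kernel_size_alt ps =
      (match pvOuterB ps ((pvBuildDivs ps 1 [] []).1 ++ (pvBuildDivs ps 1 [] []).2.reverse)
          ((pvBuildDivs ps 1 [] []).1 ++ (pvBuildDivs ps 1 [] []).2.reverse) with
        | some r => r
        | none => []) := by
    unfold get_kernel_size_alt
    rw [if_neg (by omega : ¬ ps < 1)]
  have hA : get_kernel_size ps =
      (match pvOuterA ps (PySem.List.pyRange 1 (ps + 1)) with
        | some (x, y, z) => [x, y, z]
        | none => []) := rfl
  rw [hA, hBalt]
  generalize hDv : (pvBuildDivs ps 1 [] []).1 ++ (pvBuildDivs ps 1 [] []).2.reverse = divs at hdivs hsort ⊢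
  rw [pvOuterA_eq, pvOuterB_eq]
  have hiff : ∀ a, 0 < a → a ∣ ps →
      ((pvInnerA a (PySem.Int.floordiv ps a)
          (PySem.List.pyRange 1 (PySem.Int.floordiv ps a + 1))).isSome = true ↔
        (pvInnerB (PySem.Int.floordiv ps a) a divs).isSome = true) := by
    intro a ha0 hadvd
    rw [PySem.Int.floordiv_eq_ediv_of_pos ha0, pvInnerA_eq, pvInnerB_eq,
      pvInner_eq ps a divs hps hdivs hsort (by omega) hadvd]
    simp
  have houter : (PySem.List.pyRange 1 (ps + 1)).find?
        (fun i => decide (PySem.Int.mod ps i = 0) &&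
          (pvInnerA i (PySem.Int.floordiv ps i)
            (PySem.List.pyRange 1 (PySem.Int.floordiv ps i + 1))).isSome) =
      divs.find? (fun x => (pvInnerB (PySem.Int.floordiv ps x) x divs).isSome) := by
    refine pvFind?_congr_sorted _ _ _ _ (PySem.List.pairwise_lt_pyRange_one 1 (ps + 1)) hsort ?_
    intro a
    simp only [PySem.List.mem_pyRange_one, Bool.and_eq_true, decide_eq_true_eq, hdivs a]
    constructor
    · rintro ⟨⟨ha1, ha2⟩, hmoda, hsome⟩
      have ha0 : (0:Int) < a := by omega
      have hadvd : a ∣ ps := (PySem.Int.mod_eq_zero_iff_dvd ps a).mp hmoda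
      exact ⟨⟨ha1, by omega, Int.emod_eq_zero_of_dvd hadvd⟩, (hiff a ha0 hadvd).mp hsome⟩
    · rintro ⟨⟨ha1, ha2, hamod⟩, hsome⟩
      have ha0 : (0:Int) < a := by omega
      have hadvd : a ∣ ps := Int.dvd_of_emod_eq_zero hamod
      exact ⟨⟨ha1, by omega⟩, (PySem.Int.mod_eq_zero_iff_dvd ps a).mpr hadvd,
        (hiff a ha0 hadvd).mpr hsome⟩
  rw [houter]
  rcases hF : divs.find? (fun x => (pvInnerB (PySem.Int.floordiv ps x) x divs).isSome) with _ | x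
  · simp
  · have hxmem : x ∈ divs := List.mem_of_find?_eq_some hF
    have hxp : (pvInnerB (PySem.Int.floordiv ps x) x divs).isSome = true := by
      have := List.find?_some hF
      simpa using this
    obtain ⟨hx1, hxps, hxmod⟩ := (hdivs x).mp hxmem
    have hx0 : (0:Int) < x := by omega
    have hxdvd : x ∣ ps := Int.dvd_of_emod_eq_zero hxmod
    have hfd : PySem.Int.floordiv ps x = ps / x := PySem.Int.floordiv_eq_ediv_of_pos hx0
    rcases hY : pvInnerB (PySem.Int.floordiv ps x) x divs with _ | y
    · rw [hY] at hxp
      simp at hxp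
    · have hAfind : (PySem.List.pyRange 1 (ps / x + 1)).find? (pvPA x (ps / x)) = some y := by
        rw [pvInner_eq ps x divs hps hdivs hsort hx1 hxdvd, ← pvInnerB_eq, ← hfd]
        exact hY
      rw [hfd] at hY
      simp [hY, hfd, pvInnerA_eq, hAfind]
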